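-- pv_equiv track=rewrite | github.com/oli-clive-griffin/reasoning_diffing | exp1.py | find_common_subsections
-- ===== SOURCE A (Python) =====
-- Range = tuple[int, int]
--
-- def find_common_subsections(
--     seq1: list[int], seq2: list[int]
-- ) -> list[tuple[Range, Range]]:
--     """
--     Find common subsections between two token sequences.
--
--     Returns:
--         List of tuples, where each tuple contains:
--         ((seq1_start, seq1_end), (seq2_start, seq2_end))
--
--         The ranges are inclusive for start and exclusive for end.
--     """
--     # Find all common substrings
--     common_substrings = []
--
--     i = 0
--     while i < len(seq1):
--         j = 0
--         while j < len(seq2):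
--             # Skip if not a match
--             if seq1[i] != seq2[j]:
--                 j += 1
--                 continue
--
--             # Found a match, find length
--             length = 1
--             while (
--                 i + length < len(seq1)
--                 and j + length < len(seq2)
--                 and seq1[i + length] == seq2[j + length]
--             ):
--                 length += 1
--
--             common_substrings.append((i, j, length))
--
--             # Move forward
--             j += 1
--         i += 1
--
--     # Sort by length (descending)
--     common_substrings.sort(key=lambda x: -x[2])
--
--     # Filter out overlapping substrings
--     result: list[tuple[Range, Range]] = []
--     used_indices1: set[int] = set()
--     used_indices2: set[int] = set()
--
--     for start1, start2, length in common_substrings: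
--         # Create range sets for this substring
--         range1 = set(range(start1, start1 + length))
--         range2 = set(range(start2, start2 + length))
--
--         # Check if there's any overlap with previously selected substrings
--         if not (range1 & used_indices1) and not (range2 & used_indices2):
--             result.append(((start1, start1 + length), (start2, start2 + length)))
--             used_indices1.update(range1)
--             used_indices2.update(range2)
--
--     # Sort by position in seq1
--     return sorted(result, key=lambda x: x[0][0])
-- ===== SOURCE B (Python) =====
-- def find_common_subsections(seq1, seq2):
--     """LCP dynamic programming (row i from row i+1) gives every match's run length in one
--     O(n*m) pass; greedy non-overlap selection via boolean used-index arrays."""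
--     m = len(seq2)
--     # rows[i][j] = length of the longest common run starting at seq1[i], seq2[j] (0 if no match)
--     rows = []
--     nxt = [0] * (m + 1)
--     for a in reversed(seq1):
--         row = [(nxt[j + 1] + 1 if a == seq2[j] else 0) for j in range(m)] + [0]
--         rows.append(row)
--         nxt = row
--     rows.reverse()
--     matches = [(i, j, row[j]) for i, row in enumerate(rows) for j in range(m) if row[j] > 0]
--     matches.sort(key=lambda t: -t[2])
--     result = []
--     used1 = [False] * len(seq1)
--     used2 = [False] * len(seq2)
--     for s1, s2, L in matches:
--         if all(not used1[k] for k in range(s1, s1 + L)) and \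
--            all(not used2[k] for k in range(s2, s2 + L)):
--             result.append(((s1, s1 + L), (s2, s2 + L)))
--             for k in range(s1, s1 + L):
--                 used1[k] = True
--             for k in range(s2, s2 + L):
--                 used2[k] = True
--     return sorted(result, key=lambda x: x[0][0])
-- ===== Notes on version B (the rewrite author's own statement) =====
-- stated objective: faster
-- what changed: A's per-match inner while-loop rescan is replaced by an LCP dynamic-programming table (row i computed from row i+1, so every run length costs O(1)), and A's used-index integer sets in the greedy filter are replaced by boolean used-index arrays.
import Mathlib
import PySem

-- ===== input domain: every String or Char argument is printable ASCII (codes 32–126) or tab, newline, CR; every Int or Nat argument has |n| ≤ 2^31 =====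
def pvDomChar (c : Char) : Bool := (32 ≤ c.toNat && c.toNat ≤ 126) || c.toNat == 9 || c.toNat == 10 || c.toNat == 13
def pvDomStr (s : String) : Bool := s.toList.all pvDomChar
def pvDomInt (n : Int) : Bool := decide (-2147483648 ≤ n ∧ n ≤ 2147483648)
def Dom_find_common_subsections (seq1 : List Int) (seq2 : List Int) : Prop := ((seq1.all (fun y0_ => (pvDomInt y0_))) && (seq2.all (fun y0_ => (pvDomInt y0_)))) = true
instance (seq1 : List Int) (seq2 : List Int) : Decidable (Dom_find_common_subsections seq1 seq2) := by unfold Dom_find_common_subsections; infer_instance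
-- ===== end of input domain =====

-- B replaces A's per-match run-length rescan by an LCP dynamic-programming table (row i from
-- row i+1) and A's used-index integer sets by boolean used-index arrays (objective: faster; a timing run measured B faster at all sizes).

-- ===== PORT A =====
-- inner 'while' loop of A: extend a match at (i, j) as long as the elements agree
def pvExtend (seq1 seq2 : List Int) (i j L : Int) : Int :=
  if h : i + L < (seq1.length : Int) ∧ j + L < (seq2.length : Int) ∧
         PySem.List.pyGetD seq1 (i + L) 0 = PySem.List.pyGetD seq2 (j + L) 0
  then pvExtend seq1 seq2 i j (L + 1) else L
termination_by ((seq1.length : Int) - (i + L)).toNat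
decreasing_by omega

-- body of A's selection loop: keep a candidate iff its index sets miss both used-index sets
def pvStepA (st : List ((Int × Int) × (Int × Int)) × PySem.Set Int × PySem.Set Int)
    (c : Int × Int × Int) : List ((Int × Int) × (Int × Int)) × PySem.Set Int × PySem.Set Int :=
  let range1 : PySem.Set Int := PySem.Set.ofList (PySem.List.pyRange c.1 (c.1 + c.2.2) 1)
  let range2 : PySem.Set Int := PySem.Set.ofList (PySem.List.pyRange c.2.1 (c.2.1 + c.2.2) 1)
  if PySem.Set.inter range1 st.2.1 = [] ∧ PySem.Set.inter range2 st.2.2 = [] then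
    (st.1 ++ [((c.1, c.1 + c.2.2), (c.2.1, c.2.1 + c.2.2))],
     PySem.Set.update st.2.1 range1, PySem.Set.update st.2.2 range2)
  else st

def find_common_subsections (seq1 : List Int) (seq2 : List Int) : List ((Int × Int) × (Int × Int)) :=
  let common := (PySem.List.pyRange 0 (seq1.length : Int) 1).foldl (fun acc i =>
      (PySem.List.pyRange 0 (seq2.length : Int) 1).foldl (fun acc j =>
        if PySem.List.pyGetD seq1 i 0 ≠ PySem.List.pyGetD seq2 j 0 then acc
        else acc ++ [(i, j, pvExtend seq1 seq2 i j 1)]) acc) []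
  let sortedC := PySem.List.sorted common (fun x => -x.2.2) false
  let final := sortedC.foldl pvStepA ([], [], [])
  PySem.List.sorted final.1 (fun x => x.1.1) false

-- ===== PORT B =====
-- one DP row: row[j] = nxt[j+1] + 1 if seq1-element a matches seq2[j], else 0 (trailing sentinel 0)
def pvRowStep (seq2 : List Int) (a : Int) (st : List (List Int) × List Int) :
    List (List Int) × List Int :=
  let row := ((PySem.List.pyRange 0 (seq2.length : Int) 1).map (fun j =>
      if a = PySem.List.pyGetD seq2 j 0 then PySem.List.pyGetD st.2 (j + 1) 0 + 1 else 0)) ++ [0]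
  (row :: st.1, row)

-- Source B's 'for a in reversed(seq1)' building the rows back to front, then reversing
def pvRowsAux (seq2 seq1 : List Int) : List (List Int) × List Int :=
  seq1.foldr (pvRowStep seq2) ([], List.replicate (seq2.length + 1) 0)

def pvRows (seq1 seq2 : List Int) : List (List Int) := (pvRowsAux seq2 seq1).1

-- body of B's selection loop: boolean used-index arrays instead of A's integer sets
def pvStepB (st : List ((Int × Int) × (Int × Int)) × List Bool × List Bool)
    (c : Int × Int × Int) : List ((Int × Int) × (Int × Int)) × List Bool × List Bool :=
  if ((PySem.List.pyRange c.1 (c.1 + c.2.2) 1).all fun k => !(PySem.List.pyGetD st.2.1 k false)) &&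
     ((PySem.List.pyRange c.2.1 (c.2.1 + c.2.2) 1).all fun k => !(PySem.List.pyGetD st.2.2 k false)) then
    (st.1 ++ [((c.1, c.1 + c.2.2), (c.2.1, c.2.1 + c.2.2))],
     (PySem.List.pyRange c.1 (c.1 + c.2.2) 1).foldl (fun u k => PySem.List.pySetD u k true) st.2.1,
     (PySem.List.pyRange c.2.1 (c.2.1 + c.2.2) 1).foldl (fun u k => PySem.List.pySetD u k true) st.2.2)
  else st

def find_common_subsections_alt (seq1 : List Int) (seq2 : List Int) : List ((Int × Int) × (Int × Int)) :=
  let rows := pvRows seq1 seq2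
  let cands := (PySem.List.enumerate rows 0).flatMap (fun p =>
      (PySem.List.pyRange 0 (seq2.length : Int) 1).filterMap (fun j =>
        if 0 < PySem.List.pyGetD p.2 j 0 then some (p.1, j, PySem.List.pyGetD p.2 j 0) else none))
  let sortedM := PySem.List.sorted cands (fun t => -t.2.2) false
  let final := sortedM.foldl pvStepB ([], List.replicate seq1.length false, List.replicate seq2.length false)
  PySem.List.sorted final.1 (fun x => x.1.1) false

-- ===== PRECONDITION & SPEC =====
def Spec_find_common_subsections (seq1 : List Int) (seq2 : List Int) (out : List ((Int × Int) × (Int × Int))) : Prop := out = find_common_subsections_alt seq1 seq2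
instance (seq1 : List Int) (seq2 : List Int) (out : List ((Int × Int) × (Int × Int))) : Decidable (Spec_find_common_subsections seq1 seq2 out) := by unfold Spec_find_common_subsections; infer_instance

-- ===== CLAIM (what is proved, stated in full; the proofs are below) =====
def Claim_equal_find_common_subsections : Prop := ∀ (seq1 : List Int) (seq2 : List Int), Dom_find_common_subsections seq1 seq2 → Spec_find_common_subsections seq1 seq2 (find_common_subsections seq1 seq2)

-- ===== LEMMAS AND PROOFS =====

-- length of the common run at the heads of two suffixes (proof-only characterisation)
def pvRun : List Int → List Int → Nat
  | a :: xs, b :: ys => if a = b then pvRun xs ys + 1 else 0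
  | _, _ => 0

theorem pvRun_nil_right (xs : List Int) : pvRun xs [] = 0 := by cases xs <;> rfl

theorem pvRun_le_left (xs ys : List Int) : pvRun xs ys ≤ xs.length := by
  induction xs generalizing ys with
  | nil => simp [pvRun]
  | cons a t ih =>
    cases ys with
    | nil => simp [pvRun]
    | cons b u =>
      by_cases h : a = b
      · simpa [pvRun, h] using Nat.add_le_add_right (ih u) 1
      · simp [pvRun, h]

theorem pvRun_le_right (xs ys : List Int) : pvRun xs ys ≤ ys.length := by
  induction xs generalizing ys with
  | nil => simp [pvRun]
  | cons a t ih =>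
    cases ys with
    | nil => simp [pvRun]
    | cons b u =>
      by_cases h : a = b
      · simpa [pvRun, h] using Nat.add_le_add_right (ih u) 1
      · simp [pvRun, h]

theorem pvRun_nil_left (ys : List Int) : pvRun [] ys = 0 := by cases ys <;> rfl

theorem pvExtend_run (seq1 seq2 : List Int) (i j : Int) (hi : 0 ≤ i) (hj : 0 ≤ j) :
    ∀ L : Int, 0 ≤ L →
      pvExtend seq1 seq2 i j L =
        L + (pvRun (seq1.drop (i + L).toNat) (seq2.drop (j + L).toNat) : Int) := by
  suffices H : ∀ n : Nat, ∀ L : Int, 0 ≤ L → ((seq1.length : Int) - (i + L)).toNat ≤ n →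
      pvExtend seq1 seq2 i j L = L + (pvRun (seq1.drop (i + L).toNat) (seq2.drop (j + L).toNat) : Int) by
    exact fun L hL => H _ L hL le_rfl
  intro n
  induction n with
  | zero =>
    intro L hL hn
    rw [pvExtend, dif_neg (fun h => by omega)]
    rw [List.drop_eq_nil_of_le (by omega : seq1.length ≤ (i + L).toNat)]
    simp [pvRun_nil_left]
  | succ n ih =>
    intro L hL hn
    rw [pvExtend]
    split_ifs with h
    · obtain ⟨h1, h2, h3⟩ := h
      rw [PySem.List.pyGetD_eq_getElem seq1 0 (by omega) h1,
          PySem.List.pyGetD_eq_getElem seq2 0 (by omega) h2] at h3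
      rw [ih (L + 1) (by omega) (by omega)]
      rw [(by omega : (i + (L + 1)).toNat = (i + L).toNat + 1),
          (by omega : (j + (L + 1)).toNat = (j + L).toNat + 1)]
      rw [List.drop_eq_getElem_cons (by omega : (i + L).toNat < seq1.length),
          List.drop_eq_getElem_cons (by omega : (j + L).toNat < seq2.length)]
      simp only [pvRun, h3, if_pos]
      push_cast; ring
    · suffices hz : pvRun (seq1.drop (i + L).toNat) (seq2.drop (j + L).toNat) = 0 by simp [hz]
      by_cases hA : i + L < (seq1.length : Int)
      · by_cases hB : j + L < (seq2.length : Int)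
        · have hC : PySem.List.pyGetD seq1 (i + L) 0 ≠ PySem.List.pyGetD seq2 (j + L) 0 := by tauto
          rw [PySem.List.pyGetD_eq_getElem seq1 0 (by omega) hA,
              PySem.List.pyGetD_eq_getElem seq2 0 (by omega) hB] at hC
          rw [List.drop_eq_getElem_cons (by omega : (i + L).toNat < seq1.length),
              List.drop_eq_getElem_cons (by omega : (j + L).toNat < seq2.length)]
          simp [pvRun, hC]
        · rw [List.drop_eq_nil_of_le (by omega : seq2.length ≤ (j + L).toNat)]
          exact pvRun_nil_right _
      · rw [List.drop_eq_nil_of_le (by omega : seq1.length ≤ (i + L).toNat)]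
        exact pvRun_nil_left _
theorem pvRowsAux_snd (s2 s1 : List Int) (j : Nat) :
    PySem.List.pyGetD (pvRowsAux s2 s1).2 (j : Int) 0 = (pvRun s1 (s2.drop j) : Int) := by
  induction s1 generalizing j with
  | nil =>
    simp only [pvRowsAux, List.foldr_nil, pvRun_nil_left, PySem.List.pyGetD_natCast,
      List.getD_eq_getElem?_getD, List.getElem?_replicate]
    split <;> simp
  | cons a rest ih =>
    simp only [pvRowsAux, List.foldr_cons] at ih ⊢
    simp only [pvRowStep]
    rw [PySem.List.pyGetD_natCast, List.getD_eq_getElem?_getD]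
    by_cases hj : j < s2.length
    · rw [List.getElem?_append_left (by simp [PySem.List.length_pyRange_one]; omega),
         PySem.List.getElem?_map_pyRange_zero _ _ _ (by exact_mod_cast hj)]
      simp only [Option.getD_some]
      rw [List.drop_eq_getElem_cons hj, PySem.List.pyGetD_ofNat s2 j 0 hj,
        (by push_cast; ring : ((j : Int) + 1) = ((j + 1 : Nat) : Int))]
      simp only [pvRun]
      split_ifs with ha
      · rw [ih (j + 1)]; push_cast; ring
      · simp
    · rw [List.drop_eq_nil_of_le (by omega), pvRun_nil_right]
      rw [List.getElem?_append_right (by simp [PySem.List.length_pyRange_one]; omega)]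
      simp only [PySem.List.length_pyRange_one, List.length_map]
      rcases Nat.lt_or_ge (j - (((s2.length : Int) - 0).toNat)) 1 with h | h
      · interval_cases (j - ((s2.length : Int) - 0).toNat) <;> simp
      · rw [List.getElem?_eq_none (by simpa using h)]; simp

theorem pvRows_cons' (a : Int) (rest s2 : List Int) :
    pvRows (a :: rest) s2 = (pvRowsAux s2 (a :: rest)).2 :: pvRows rest s2 := rfl

theorem pvRows_getD (s1 s2 : List Int) (i j : Nat) :
    PySem.List.pyGetD (PySem.List.pyGetD (pvRows s1 s2) (i : Int) []) (j : Int) 0 =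
      (pvRun (s1.drop i) (s2.drop j) : Int) := by
  induction s1 generalizing i with
  | nil =>
    simp [pvRows, pvRowsAux, PySem.List.pyGetD_natCast, pvRun_nil_left]
  | cons a rest ih =>
    rw [pvRows_cons']
    cases i with
    | zero =>
      simpa using pvRowsAux_snd s2 (a :: rest) j
    | succ i' =>
      have step : PySem.List.pyGetD ((pvRowsAux s2 (a :: rest)).2 :: pvRows rest s2)
          ((i' + 1 : Nat) : Int) [] = PySem.List.pyGetD (pvRows rest s2) (i' : Int) [] := by
        rw [PySem.List.pyGetD_natCast, List.getD_cons_succ, ← PySem.List.pyGetD_natCast]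
      rw [step, ih]
      simp
theorem pvRows_length' (s1 s2 : List Int) : (pvRows s1 s2).length = s1.length := by
  induction s1 with
  | nil => rfl
  | cons a rest ih => rw [pvRows_cons']; simp [ih]

theorem pvFlatMap_congr {α β : Type} (l : List α) (f g : α → List β)
    (h : ∀ x ∈ l, f x = g x) : l.flatMap f = l.flatMap g := by
  induction l with
  | nil => rfl
  | cons a t ih => simp [List.flatMap_cons, h a (by simp), ih (fun x hx => h x (by simp [hx]))]

theorem pvFilterMap_eq {α β : Type} (l : List α) (p : α → Prop) [DecidablePred p]
    (f : α → β) (g : α → Option β)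
    (h : ∀ x ∈ l, g x = if p x then some (f x) else none) :
    (l.filter (fun x => decide (p x))).map f = l.filterMap g := by
  induction l with
  | nil => rfl
  | cons a t ih =>
    rw [List.filter_cons, List.filterMap_cons, h a (by simp)]
    by_cases hp : p a <;> simp [hp, ih (fun x hx => h x (by simp [hx]))]

theorem pvCands_eq (seq1 seq2 : List Int) :
    ((PySem.List.pyRange 0 (seq1.length : Int) 1).foldl (fun acc i =>
      (PySem.List.pyRange 0 (seq2.length : Int) 1).foldl (fun acc j =>
        if PySem.List.pyGetD seq1 i 0 ≠ PySem.List.pyGetD seq2 j 0 then acc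
        else acc ++ [(i, j, pvExtend seq1 seq2 i j 1)]) acc) []) =
    ((PySem.List.enumerate (pvRows seq1 seq2) 0).flatMap (fun p =>
      (PySem.List.pyRange 0 (seq2.length : Int) 1).filterMap (fun j =>
        if 0 < PySem.List.pyGetD p.2 j 0 then some (p.1, j, PySem.List.pyGetD p.2 j 0) else none))) := by
  rw [PySem.List.enumerate_eq_map_pyRange _ ([] : List Int), List.flatMap_map]
  simp only [PySem.List.len_eq, pvRows_length']
  have hinner : ∀ (acc : List (Int × Int × Int)), ∀ i ∈ PySem.List.pyRange 0 (seq1.length : Int) 1,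
      ((PySem.List.pyRange 0 (seq2.length : Int) 1).foldl (fun acc j =>
        if PySem.List.pyGetD seq1 i 0 ≠ PySem.List.pyGetD seq2 j 0 then acc
        else acc ++ [(i, j, pvExtend seq1 seq2 i j 1)]) acc) = acc ++
      ((PySem.List.pyRange 0 (seq2.length : Int) 1).filter (fun j =>
        decide (PySem.List.pyGetD seq1 i 0 = PySem.List.pyGetD seq2 j 0))).map
        (fun j => (i, j, pvExtend seq1 seq2 i j 1)) := by
    intro acc i _
    rw [PySem.List.foldl_congr_mem _ _ (fun acc j =>
        if PySem.List.pyGetD seq1 i 0 = PySem.List.pyGetD seq2 j 0 then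
          acc ++ [(i, j, pvExtend seq1 seq2 i j 1)] else acc) _
        (fun acc' j _ => by
          by_cases h : PySem.List.pyGetD seq1 i 0 = PySem.List.pyGetD seq2 j 0 <;> simp [h])]
    exact PySem.List.foldl_append_ite _ _ _ _
  rw [PySem.List.foldl_congr_mem _ _ _ _ hinner, PySem.List.foldl_append_eq_flatMap,
    List.nil_append]
  apply pvFlatMap_congr
  intro i hi
  obtain ⟨hi0, hin⟩ := PySem.List.mem_pyRange_one.mp hi
  apply pvFilterMap_eq
  intro j hj
  obtain ⟨hj0, hjm⟩ := PySem.List.mem_pyRange_one.mp hj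
  have hieq : i = ((i.toNat : Nat) : Int) := (Int.toNat_of_nonneg hi0).symm
  have hjeq : j = ((j.toNat : Nat) : Int) := (Int.toNat_of_nonneg hj0).symm
  have hv : PySem.List.pyGetD (PySem.List.pyGetD (pvRows seq1 seq2) i []) j 0 =
      (pvRun (seq1.drop i.toNat) (seq2.drop j.toNat) : Int) := by
    rw [hieq, hjeq]; exact pvRows_getD seq1 seq2 i.toNat j.toNat
  have hd1 : seq1.drop i.toNat = seq1[i.toNat] :: seq1.drop (i.toNat + 1) :=
    List.drop_eq_getElem_cons (by omega)
  have hd2 : seq2.drop j.toNat = seq2[j.toNat] :: seq2.drop (j.toNat + 1) :=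
    List.drop_eq_getElem_cons (by omega)
  have hga : PySem.List.pyGetD seq1 i 0 = seq1[i.toNat] :=
    PySem.List.pyGetD_eq_getElem seq1 0 hi0 hin
  have hgb : PySem.List.pyGetD seq2 j 0 = seq2[j.toNat] :=
    PySem.List.pyGetD_eq_getElem seq2 0 hj0 hjm
  rw [hv, hd1, hd2]
  simp only [pvRun]
  by_cases hc : seq1[i.toNat] = seq2[j.toNat]
  · rw [if_pos hc, if_pos (by positivity : (0:Int) <
      ((pvRun (seq1.drop (i.toNat + 1)) (seq2.drop (j.toNat + 1)) + 1 : Nat) : Int)),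
      if_pos (by rw [hga, hgb]; exact hc)]
    have hext := pvExtend_run seq1 seq2 i j hi0 hj0 1 (by omega)
    have e1 : (i + 1).toNat = i.toNat + 1 := by omega
    have e2 : (j + 1).toNat = j.toNat + 1 := by omega
    rw [hext, e1, e2]
    have : ((pvRun (seq1.drop (i.toNat + 1)) (seq2.drop (j.toNat + 1)) + 1 : Nat) : Int) =
        1 + ((pvRun (seq1.drop (i.toNat + 1)) (seq2.drop (j.toNat + 1)) : Nat) : Int) := by
      push_cast; ring
    rw [this]
  · rw [if_neg hc, hga, hgb]
    simp [hc]

theorem pvCands_mem (seq1 seq2 : List Int) (c : Int × Int × Int)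
    (hc : c ∈ (PySem.List.enumerate (pvRows seq1 seq2) 0).flatMap (fun p =>
      (PySem.List.pyRange 0 (seq2.length : Int) 1).filterMap (fun j =>
        if 0 < PySem.List.pyGetD p.2 j 0 then some (p.1, j, PySem.List.pyGetD p.2 j 0) else none))) :
    0 ≤ c.1 ∧ 0 ≤ c.2.1 ∧ 1 ≤ c.2.2 ∧ c.1 + c.2.2 ≤ (seq1.length : Int) ∧
      c.2.1 + c.2.2 ≤ (seq2.length : Int) := by
  rw [PySem.List.enumerate_eq_map_pyRange _ ([] : List Int), List.flatMap_map] at hc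
  simp only [PySem.List.len_eq, pvRows_length'] at hc
  obtain ⟨i, hi, hmem⟩ := List.mem_flatMap.mp hc
  obtain ⟨j, hj, hg⟩ := List.mem_filterMap.mp hmem
  obtain ⟨hi0, hin⟩ := PySem.List.mem_pyRange_one.mp hi
  obtain ⟨hj0, hjm⟩ := PySem.List.mem_pyRange_one.mp hj
  have hv : PySem.List.pyGetD (PySem.List.pyGetD (pvRows seq1 seq2) i []) j 0 =
      (pvRun (seq1.drop i.toNat) (seq2.drop j.toNat) : Int) := by
    rw [(Int.toNat_of_nonneg hi0).symm, (Int.toNat_of_nonneg hj0).symm]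
    exact pvRows_getD seq1 seq2 i.toNat j.toNat
  by_cases hpos : 0 < PySem.List.pyGetD (PySem.List.pyGetD (pvRows seq1 seq2) i []) j 0
  · rw [if_pos hpos] at hg
    obtain rfl : c = (i, j, PySem.List.pyGetD (PySem.List.pyGetD (pvRows seq1 seq2) i []) j 0) :=
      (Option.some.injEq _ _ ▸ hg).symm
    have b1 : (pvRun (seq1.drop i.toNat) (seq2.drop j.toNat) : Int) ≤ (seq1.length : Int) - i := by
      have := pvRun_le_left (seq1.drop i.toNat) (seq2.drop j.toNat)
      simp only [List.length_drop] at this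
      omega
    have b2 : (pvRun (seq1.drop i.toNat) (seq2.drop j.toNat) : Int) ≤ (seq2.length : Int) - j := by
      have := pvRun_le_right (seq1.drop i.toNat) (seq2.drop j.toNat)
      simp only [List.length_drop] at this
      omega
    refine ⟨hi0, hj0, ?_, ?_, ?_⟩ <;> simp only [hv] at hpos ⊢ <;> omega
  · rw [if_neg hpos] at hg
    exact absurd hg (by simp)
theorem pvCover_iff' {γ : Type} (res : List γ) (lo hi : γ → Int)
    (hres : ∀ r ∈ res, lo r < hi r) (s L : Int) (hL : 1 ≤ L) :
    (∀ x : Int, s ≤ x → x < s + L → ¬ ∃ r ∈ res, lo r ≤ x ∧ x < hi r) ↔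
      ∀ r ∈ res, hi r ≤ s ∨ s + L ≤ lo r := by
  constructor
  · intro h r hr
    by_contra hne
    push_neg at hne
    exact h (max (lo r) s) (le_max_right _ _)
      (by have := hres r hr; omega) ⟨r, hr, le_max_left _ _, by have := hres r hr; omega⟩
  · rintro h x hx1 hx2 ⟨r, hr, hc1, hc2⟩
    have := h r hr; omega

theorem pvSetTrue_length' (l : List Int) (u : List Bool) :
    (l.foldl (fun u k => PySem.List.pySetD u k true) u).length = u.length := by
  induction l generalizing u with
  | nil => rfl
  | cons x t ih => simp [List.foldl_cons, ih, PySem.List.length_pySetD]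

theorem pvSetTrue_getD' (b : Int) : ∀ (n : Nat) (a : Int) (u : List Bool), 0 ≤ a →
    b ≤ (u.length : Int) → (b - a).toNat = n → ∀ k : Int, 0 ≤ k →
    PySem.List.pyGetD ((PySem.List.pyRange a b 1).foldl
        (fun u k => PySem.List.pySetD u k true) u) k false =
      (if a ≤ k ∧ k < b then true else PySem.List.pyGetD u k false) := by
  intro n
  induction n with
  | zero =>
    intro a u ha hb hn k hk
    rw [PySem.List.pyRange_one_eq_nil (by omega), List.foldl_nil, if_neg (by omega)]
  | succ n ih =>
    intro a u ha hb hn k hk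
    rcases (by omega : b ≤ a ∨ a < b) with hba | hab
    · rw [PySem.List.pyRange_one_eq_nil hba, List.foldl_nil, if_neg (by omega)]
    · rw [PySem.List.pyRange_one_cons hab, List.foldl_cons]
      rw [ih (a + 1) (PySem.List.pySetD u a true) (by omega)
        (by rw [PySem.List.length_pySetD]; omega) (by omega) k hk]
      have e : PySem.List.pyGetD (PySem.List.pySetD u a true) k false =
          (if k = a then true else PySem.List.pyGetD u k false) := by
        rw [(Int.toNat_of_nonneg ha).symm, (Int.toNat_of_nonneg hk).symm,
          PySem.List.pyGetD_pySetD_natCast u a.toNat k.toNat true false (by omega)]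
        by_cases h : k.toNat = a.toNat
        · rw [if_pos h, if_pos (by omega)]
        · rw [if_neg h, if_neg (by omega)]
      rw [e]
      split_ifs <;> first | rfl | (exfalso; omega)

theorem pvFold_eq (cs : List (Int × Int × Int)) : ∀ (res : List ((Int × Int) × (Int × Int)))
    (u1 u2 : PySem.Set Int) (b1 b2 : List Bool),
    (∀ c ∈ cs, 0 ≤ c.1 ∧ 0 ≤ c.2.1 ∧ 1 ≤ c.2.2 ∧ c.1 + c.2.2 ≤ (b1.length : Int) ∧
      c.2.1 + c.2.2 ≤ (b2.length : Int)) →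
    (∀ r ∈ res, r.1.1 < r.1.2 ∧ r.2.1 < r.2.2) →
    (∀ k : Int, k ∈ u1 ↔ ∃ r ∈ res, r.1.1 ≤ k ∧ k < r.1.2) →
    (∀ k : Int, k ∈ u2 ↔ ∃ r ∈ res, r.2.1 ≤ k ∧ k < r.2.2) →
    (∀ k : Int, 0 ≤ k → (PySem.List.pyGetD b1 k false = true ↔ ∃ r ∈ res, r.1.1 ≤ k ∧ k < r.1.2)) →
    (∀ k : Int, 0 ≤ k → (PySem.List.pyGetD b2 k false = true ↔ ∃ r ∈ res, r.2.1 ≤ k ∧ k < r.2.2)) →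
    (cs.foldl pvStepA (res, u1, u2)).1 = (cs.foldl pvStepB (res, b1, b2)).1 := by
  induction cs with
  | nil => intro res u1 u2 b1 b2 _ _ _ _ _ _; rfl
  | cons c t ih =>
    intro res u1 u2 b1 b2 hcs hres hu1 hu2 hb1 hb2
    obtain ⟨s, s2, L⟩ := c
    obtain ⟨hs0, hs20, hL1, hsb1, hsb2⟩ := hcs _ (List.mem_cons_self)
    simp only at hs0 hs20 hL1 hsb1 hsb2
    have hD1iffA : (PySem.Set.inter (PySem.Set.ofList (PySem.List.pyRange s (s + L) 1)) u1 = []) ↔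
        (∀ r ∈ res, r.1.2 ≤ s ∨ s + L ≤ r.1.1) := by
      rw [PySem.Set.ofList_eq_self_of_nodup _ (PySem.List.nodup_pyRange_one _ _)]
      show (List.filter _ _ = []) ↔ _
      rw [List.filter_eq_nil_iff]
      rw [← pvCover_iff' res (fun r => r.1.1) (fun r => r.1.2)
        (fun r hr => (hres r hr).1) s L hL1]
      constructor
      · intro h x hx1 hx2 hex
        have := h x (PySem.List.mem_pyRange_one.mpr ⟨hx1, hx2⟩)
        rw [PySem.Set.contains_iff] at this
        exact this ((hu1 x).mpr hex)
      · intro h x hx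
        obtain ⟨hx1, hx2⟩ := PySem.List.mem_pyRange_one.mp hx
        rw [PySem.Set.contains_iff]
        intro hmem
        exact h x hx1 hx2 ((hu1 x).mp hmem)
    have hD2iffA : (PySem.Set.inter (PySem.Set.ofList (PySem.List.pyRange s2 (s2 + L) 1)) u2 = []) ↔
        (∀ r ∈ res, r.2.2 ≤ s2 ∨ s2 + L ≤ r.2.1) := by
      rw [PySem.Set.ofList_eq_self_of_nodup _ (PySem.List.nodup_pyRange_one _ _)]
      show (List.filter _ _ = []) ↔ _
      rw [List.filter_eq_nil_iff]
      rw [← pvCover_iff' res (fun r => r.2.1) (fun r => r.2.2)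
        (fun r hr => (hres r hr).2) s2 L hL1]
      constructor
      · intro h x hx1 hx2 hex
        have := h x (PySem.List.mem_pyRange_one.mpr ⟨hx1, hx2⟩)
        rw [PySem.Set.contains_iff] at this
        exact this ((hu2 x).mpr hex)
      · intro h x hx
        obtain ⟨hx1, hx2⟩ := PySem.List.mem_pyRange_one.mp hx
        rw [PySem.Set.contains_iff]
        intro hmem
        exact h x hx1 hx2 ((hu2 x).mp hmem)
    have hD1iffB : (((PySem.List.pyRange s (s + L) 1).all fun k =>
        !(PySem.List.pyGetD b1 k false)) = true) ↔ (∀ r ∈ res, r.1.2 ≤ s ∨ s + L ≤ r.1.1) := by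
      rw [List.all_eq_true,
        ← pvCover_iff' res (fun r => r.1.1) (fun r => r.1.2) (fun r hr => (hres r hr).1) s L hL1]
      constructor
      · intro h x hx1 hx2 hex
        have := h x (PySem.List.mem_pyRange_one.mpr ⟨hx1, hx2⟩)
        rw [Bool.not_eq_true'] at this
        rw [(hb1 x (by omega)).mpr hex] at this
        simp at this
      · intro h x hx
        obtain ⟨hx1, hx2⟩ := PySem.List.mem_pyRange_one.mp hx
        rw [Bool.not_eq_true']
        by_contra hne
        rw [Bool.not_eq_false] at hne
        exact h x hx1 hx2 ((hb1 x (by omega)).mp hne)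
    have hD2iffB : (((PySem.List.pyRange s2 (s2 + L) 1).all fun k =>
        !(PySem.List.pyGetD b2 k false)) = true) ↔ (∀ r ∈ res, r.2.2 ≤ s2 ∨ s2 + L ≤ r.2.1) := by
      rw [List.all_eq_true,
        ← pvCover_iff' res (fun r => r.2.1) (fun r => r.2.2) (fun r hr => (hres r hr).2) s2 L hL1]
      constructor
      · intro h x hx1 hx2 hex
        have := h x (PySem.List.mem_pyRange_one.mpr ⟨hx1, hx2⟩)
        rw [Bool.not_eq_true'] at this
        rw [(hb2 x (by omega)).mpr hex] at this
        simp at this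
      · intro h x hx
        obtain ⟨hx1, hx2⟩ := PySem.List.mem_pyRange_one.mp hx
        rw [Bool.not_eq_true']
        by_contra hne
        rw [Bool.not_eq_false] at hne
        exact h x hx1 hx2 ((hb2 x (by omega)).mp hne)
    simp only [List.foldl_cons]
    by_cases hD1 : ∀ r ∈ res, r.1.2 ≤ s ∨ s + L ≤ r.1.1
    · by_cases hD2 : ∀ r ∈ res, r.2.2 ≤ s2 ∨ s2 + L ≤ r.2.1
      · -- both windows free: both sides keep the candidate
        rw [show pvStepA (res, u1, u2) (s, s2, L) =
            (res ++ [((s, s + L), (s2, s2 + L))],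
             PySem.Set.update u1 (PySem.Set.ofList (PySem.List.pyRange s (s + L) 1)),
             PySem.Set.update u2 (PySem.Set.ofList (PySem.List.pyRange s2 (s2 + L) 1))) from by
          simp only [pvStepA]
          rw [if_pos ⟨hD1iffA.mpr hD1, hD2iffA.mpr hD2⟩]]
        rw [show pvStepB (res, b1, b2) (s, s2, L) =
            (res ++ [((s, s + L), (s2, s2 + L))],
             (PySem.List.pyRange s (s + L) 1).foldl (fun u k => PySem.List.pySetD u k true) b1,
             (PySem.List.pyRange s2 (s2 + L) 1).foldl (fun u k => PySem.List.pySetD u k true) b2) from by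
          simp only [pvStepB]
          rw [if_pos (by rw [Bool.and_eq_true]; exact ⟨hD1iffB.mpr hD1, hD2iffB.mpr hD2⟩)]]
        apply ih
        · intro d hd
          have := hcs d (List.mem_cons_of_mem _ hd)
          rwa [pvSetTrue_length', pvSetTrue_length']
        · intro r hr
          rcases List.mem_append.mp hr with h | h
          · exact hres r h
          · simp only [List.mem_singleton] at h
            subst h
            constructor <;> simp <;> omega
        · intro k
          rw [PySem.Set.mem_update]
          rw [PySem.Set.mem_ofList, PySem.List.mem_pyRange_one, hu1 k]
          constructor
          · rintro (⟨r, hr, hk⟩ | hk)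
            · exact ⟨r, List.mem_append_left _ hr, hk⟩
            · exact ⟨((s, s + L), (s2, s2 + L)), List.mem_append_right _ (by simp), by simpa using hk⟩
          · rintro ⟨r, hr, hk⟩
            rcases List.mem_append.mp hr with h | h
            · exact Or.inl ⟨r, h, hk⟩
            · simp only [List.mem_singleton] at h; subst h; right; simpa using hk
        · intro k
          rw [PySem.Set.mem_update]
          rw [PySem.Set.mem_ofList, PySem.List.mem_pyRange_one, hu2 k]
          constructor
          · rintro (⟨r, hr, hk⟩ | hk)
            · exact ⟨r, List.mem_append_left _ hr, hk⟩
            · exact ⟨((s, s + L), (s2, s2 + L)), List.mem_append_right _ (by simp), by simpa using hk⟩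
          · rintro ⟨r, hr, hk⟩
            rcases List.mem_append.mp hr with h | h
            · exact Or.inl ⟨r, h, hk⟩
            · simp only [List.mem_singleton] at h; subst h; right; simpa using hk
        · intro k hk
          rw [pvSetTrue_getD' (s + L) (s + L - s).toNat s b1 hs0 hsb1 rfl k hk]
          split_ifs with h
          · simp only [true_iff]
            exact ⟨((s, s + L), (s2, s2 + L)), List.mem_append_right _ (by simp), by simpa using h⟩
          · rw [hb1 k hk]
            constructor
            · rintro ⟨r, hr, hk'⟩; exact ⟨r, List.mem_append_left _ hr, hk'⟩
            · rintro ⟨r, hr, hk'⟩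
              rcases List.mem_append.mp hr with h' | h'
              · exact ⟨r, h', hk'⟩
              · simp only [List.mem_singleton] at h'; subst h'
                exact absurd (by simpa using hk') h
        · intro k hk
          rw [pvSetTrue_getD' (s2 + L) (s2 + L - s2).toNat s2 b2 hs20 hsb2 rfl k hk]
          split_ifs with h
          · simp only [true_iff]
            exact ⟨((s, s + L), (s2, s2 + L)), List.mem_append_right _ (by simp), by simpa using h⟩
          · rw [hb2 k hk]
            constructor
            · rintro ⟨r, hr, hk'⟩; exact ⟨r, List.mem_append_left _ hr, hk'⟩
            · rintro ⟨r, hr, hk'⟩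
              rcases List.mem_append.mp hr with h' | h'
              · exact ⟨r, h', hk'⟩
              · simp only [List.mem_singleton] at h'; subst h'
                exact absurd (by simpa using hk') h
      · -- second window blocked: both sides skip
        rw [show pvStepA (res, u1, u2) (s, s2, L) = (res, u1, u2) from by
            simp only [pvStepA]
            rw [if_neg (fun h => hD2 (hD2iffA.mp h.2))]]
        rw [show pvStepB (res, b1, b2) (s, s2, L) = (res, b1, b2) from by
            simp only [pvStepB]
            rw [if_neg (fun h => hD2 (hD2iffB.mp (Bool.and_eq_true _ _ ▸ h).2))]]
        exact ih res u1 u2 b1 b2 (fun d hd => hcs d (List.mem_cons_of_mem _ hd)) hres hu1 hu2 hb1 hb2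
    · -- first window blocked: both sides skip
      rw [show pvStepA (res, u1, u2) (s, s2, L) = (res, u1, u2) from by
          simp only [pvStepA]
          rw [if_neg (fun h => hD1 (hD1iffA.mp h.1))]]
      rw [show pvStepB (res, b1, b2) (s, s2, L) = (res, b1, b2) from by
          simp only [pvStepB]
          rw [if_neg (fun h => hD1 (hD1iffB.mp (Bool.and_eq_true _ _ ▸ h).1))]]
      exact ih res u1 u2 b1 b2 (fun d hd => hcs d (List.mem_cons_of_mem _ hd)) hres hu1 hu2 hb1 hb2
theorem pvGetD_replicate_false (n : Nat) (k : Int) (hk : 0 ≤ k) :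
    PySem.List.pyGetD (List.replicate n false) k false = false := by
  rw [(Int.toNat_of_nonneg hk).symm, PySem.List.pyGetD_natCast,
    List.getD_eq_getElem?_getD, List.getElem?_replicate]
  split <;> simp

theorem find_common_subsections_spec : Claim_equal_find_common_subsections := by
  intro seq1 seq2 _
  unfold Spec_find_common_subsections
  simp only [find_common_subsections, find_common_subsections_alt]
  rw [pvCands_eq]
  congr 1
  apply pvFold_eq
  · intro c hcmem
    have := pvCands_mem seq1 seq2 c ((PySem.List.mem_sorted _ _ _ _).mp hcmem)
    simpa [List.length_replicate] using this
  · simp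
  · simp
  · simp
  · intro k hk
    rw [pvGetD_replicate_false _ _ hk]
    simp
  · intro k hk
    rw [pvGetD_replicate_false _ _ hk]
    simp
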